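-- pv_equiv track=rewrite | github.com/Marc416/ndb_algorithm | AlgorithmStudy/Part3/1. 그리디/6. 무지의 먹방라이브.py | solution
-- ===== SOURCE A (Python) =====
-- def solution(food_times, k):
--     for idx, value in enumerate(food_times):
--         food_times[idx] = [idx, value]
--
--     time = 0
--
--     while True:
--         for value in food_times[:]:
--
--             if time == k:
--                 if value[1] <= 0:
--                     return -1
--                 answer = value[0] + 1
--                 return answer
--
--             value[1] -= 1
--             if value[1] == 0:
--                 food_times.remove(value)
--             time += 1
-- ===== SOURCE B (Python) =====
-- def solution(food_times, k):
--     """Foods are visited round-robin in index order, one second per visit; a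
--     food with a positive amount disappears once fully eaten, while a food with
--     a non-positive amount never finishes.  Return the 1-based index of the food
--     being eaten at second k, or -1 if that food cannot be eaten.
--
--     Instead of simulating second by second, sort the finishable amounts and
--     consume whole layers of full passes at once via their cost, then locate
--     second k inside the layer it falls in."""
--     finite = sorted(v for v in food_times if v > 0)
--     alive = len(food_times)
--     time = prev = 0
--     for v in finite:
--         layer = (v - prev) * alive
--         if time + layer > k:
--             break
--         time += layer
--         prev = v
--         alive -= 1
--     survivors = [i for i, v in enumerate(food_times) if v > prev or v <= 0]
--     idx = survivors[(k - time) % alive]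
--     return idx + 1 if food_times[idx] > 0 else -1
-- ===== Notes on version B (the rewrite author's own statement) =====
-- stated objective: faster
-- what changed: A simulates the round-robin eating second by second (list-rebuilding remove inside the loop); B sorts the finishable amounts and consumes whole layers of full passes at once, then indexes the surviving foods directly; Pre_ excludes only the inputs on which A never returns (negative k, or all amounts positive with k at least their sum).
import Mathlib
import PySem

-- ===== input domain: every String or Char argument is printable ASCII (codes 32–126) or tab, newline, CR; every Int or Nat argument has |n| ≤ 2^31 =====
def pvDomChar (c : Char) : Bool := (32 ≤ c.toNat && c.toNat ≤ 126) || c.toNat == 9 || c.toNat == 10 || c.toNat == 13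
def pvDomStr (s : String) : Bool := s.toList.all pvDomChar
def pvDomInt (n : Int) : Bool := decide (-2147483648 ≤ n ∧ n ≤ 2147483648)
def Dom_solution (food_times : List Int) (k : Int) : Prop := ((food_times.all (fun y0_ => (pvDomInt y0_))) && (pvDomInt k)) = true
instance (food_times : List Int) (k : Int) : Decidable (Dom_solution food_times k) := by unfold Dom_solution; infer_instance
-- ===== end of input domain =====

-- B replaces A's second-by-second round-robin simulation by sorting the finishable
-- amounts and consuming whole layers of full passes at once, then locating second k
-- inside its layer; the equivalence is about the RETURN value only (Python A rewrites
-- its food_times argument in place).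

-- ===== PORT A =====
-- A's inner `for value in food_times[:]` pass: the in-place `value[1] -= 1` /
-- `food_times.remove(value)` become rebuilding the updated live list in `acc`.
def pvVisitA (snap : List (Int × Int)) (acc : List (Int × Int)) (time k : Int) :
    (List (Int × Int) × Int) ⊕ Int :=
  match snap with
  | [] => Sum.inl (acc, time)
  | (i, r) :: rest =>
      if time = k then Sum.inr (if r ≤ 0 then -1 else i + 1)
      else
        pvVisitA rest (if r - 1 = 0 then acc else acc ++ [(i, r - 1)]) (time + 1) k

-- A's `while True`: fuel bounds the number of passes; under Pre_ the answer is
-- reached within k.toNat + 1 passes, so the fuel-exhaustion branch is unreachable.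
def pvLoopA : Nat → List (Int × Int) → Int → Int → Int
  | 0, _, _, _ => -1
  | fuel + 1, fts, time, k =>
      match pvVisitA fts [] time k with
      | Sum.inr ans => ans
      | Sum.inl (fts', time') => pvLoopA fuel fts' time' k

def solution (food_times : List Int) (k : Int) : Int :=
  pvLoopA (k.toNat + 1) (PySem.List.enumerate food_times 0) 0 k

-- ===== PORT B =====
-- Source B's `for v in finite: … break` loop, carried state (time, prev, alive).
def pvLayersB (k : Int) : List Int → Int → Int → Int → Int × Int × Int
  | [], time, prev, alive => (time, prev, alive)
  | v :: rest, time, prev, alive =>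
      if time + (v - prev) * alive > k then (time, prev, alive)
      else pvLayersB k rest (time + (v - prev) * alive) v (alive - 1)

def solution_alt (food_times : List Int) (k : Int) : Int :=
  let finite := PySem.List.sorted (food_times.filter (fun v => decide (0 < v))) (fun v => v) false
  let s := pvLayersB k finite 0 0 (food_times.length : Int)
  let survivors := (PySem.List.enumerate food_times 0).filterMap
      (fun iv => if s.2.1 < iv.2 ∨ iv.2 ≤ 0 then some iv.1 else none)
  match PySem.List.pyGet? survivors (PySem.Int.mod (k - s.1) s.2.2) with
  | some i => if 0 < PySem.List.pyGetD food_times i 0 then i + 1 else -1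
  | none => -1   -- IndexError in Python; unreachable under Pre_

-- ===== PRECONDITION & SPEC =====
-- Pre_ = exactly the inputs on which A terminates: A loops forever when k < 0, when
-- food_times is empty, or when every amount is positive and k ≥ their sum (a value ≤ 0
-- is decremented past 0, never removed, and keeps the loop alive for every k ≥ 0).
def Pre_solution (food_times : List Int) (k : Int) : Prop :=
  0 ≤ k ∧ ((∃ v ∈ food_times, v ≤ 0) ∨ k < (food_times.map (fun v => max v 0)).sum)
instance (food_times : List Int) (k : Int) : Decidable (Pre_solution food_times k) := by
  unfold Pre_solution; infer_instance

def pvWitness_solution : List Int × Int := ([3, 1, 2], 5)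

def Spec_solution (food_times : List Int) (k : Int) (out : Int) : Prop := out = solution_alt food_times k
instance (food_times : List Int) (k : Int) (out : Int) : Decidable (Spec_solution food_times k out) := by unfold Spec_solution; infer_instance

-- ===== CLAIM (what is proved, stated in full; the proofs are below) =====
def Claim_equal_solution : Prop := ∀ (food_times : List Int) (k : Int), Dom_solution food_times k → Pre_solution food_times k → Spec_solution food_times k (solution food_times k)

-- ===== LEMMAS AND PROOFS =====

-- number of visits made during the first p full passes
def pvPassesTime (food_times : List Int) (p : Int) : Int :=
  (food_times.map (fun v => if v ≤ 0 then p else if v < p then v else p)).sum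

-- number of foods still alive at the start of pass q (never-finishing or not yet eaten)
def pvAC (fts : List Int) (q : Int) : Int :=
  ((fts.filter (fun w => decide (w ≤ 0 ∨ q < w))).length : Int)

-- number of never-finishing foods
def pvNP (fts : List Int) : Int := ((fts.filter (fun w => decide (w ≤ 0))).length : Int)

-- the element survival/decrement map after p full passes
def pvAliveF (p : Nat) : Int × Int → Option (Int × Int) :=
  fun iv => if iv.2 ≤ 0 ∨ (p : Int) < iv.2 then some (iv.1, iv.2 - p) else none

-- live list at the start of pass p
def pvAlive (fts : List Int) (p : Nat) : List (Int × Int) :=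
  (PySem.List.enumerate fts 0).filterMap (pvAliveF p)

-- time at the start of pass p
def pvT (fts : List Int) : Nat → Int
  | 0 => 0
  | p + 1 => pvT fts p + ((pvAlive fts p).length : Int)

def pvAns : Int × Int → Int := fun ir => if ir.2 ≤ 0 then -1 else ir.1 + 1

lemma pvNP_split : ∀ (l : List Int),
    (l.length : Int) = pvNP l + ((l.filter (fun v => decide (0 < v))).length : Int) := by
  intro l
  induction l with
  | nil => decide
  | cons x xs ih =>
      simp only [pvNP, List.filter_cons, decide_eq_true_eq, List.length_cons] at ih ⊢
      split_ifs <;> (try simp only [List.length_cons]) <;> (try push_cast at ih ⊢) <;> omega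

lemma pvVisitA_skip (k : Int) : ∀ (snap acc : List (Int × Int)) (time : Int),
    time + snap.length ≤ k →
    pvVisitA snap acc time k =
      Sum.inl (acc ++ snap.filterMap (fun iv => if iv.2 - 1 = 0 then none else some (iv.1, iv.2 - 1)),
               time + snap.length) := by
  intro snap
  induction snap with
  | nil => intro acc time h; simp [pvVisitA]
  | cons hd tl ih =>
      intro acc time h
      obtain ⟨i, r⟩ := hd
      simp only [List.length_cons] at h
      have hne : time ≠ k := by push_cast at h ⊢; omega
      simp only [pvVisitA, if_neg hne]
      rw [ih _ (time + 1) (by push_cast at h ⊢; omega)]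
      by_cases h0 : r - 1 = 0 <;>
        simp [h0, List.append_assoc] <;>
        omega

lemma pvVisitA_hit (k : Int) : ∀ (snap acc : List (Int × Int)) (time : Int)
    (h1 : time ≤ k) (h2 : k < time + snap.length),
    pvVisitA snap acc time k =
      Sum.inr (pvAns (snap.getD (k - time).toNat (0, 0))) := by
  intro snap
  induction snap with
  | nil => intro acc time _ h2; simp at h2; omega
  | cons hd tl ih =>
      intro acc time h1 h2
      obtain ⟨i, r⟩ := hd
      by_cases he : time = k
      · subst he
        simp [pvVisitA, pvAns]
      · have h1' : time + 1 ≤ k := by omega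
        simp only [pvVisitA, if_neg he]
        rw [ih _ (time + 1) h1' (by simp at h2 ⊢; omega)]
        congr 2
        have : (k - time).toNat = (k - (time + 1)).toNat + 1 := by omega
        simp [this]

lemma pvAlive_step (fts : List Int) (p : Nat) :
    (pvAlive fts p).filterMap (fun iv => if iv.2 - 1 = 0 then none else some (iv.1, iv.2 - 1)) =
      pvAlive fts (p + 1) := by
  unfold pvAlive
  rw [List.filterMap_filterMap]
  apply List.filterMap_congr
  intro iv _
  obtain ⟨i, v⟩ := iv
  simp only [pvAliveF]
  by_cases h1 : v ≤ 0 ∨ (p : Int) < v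
  · rw [if_pos h1, Option.bind_some]
    by_cases h2 : v - (p : Int) - 1 = 0
    · rw [if_pos h2, if_neg (by push_cast; omega)]
    · rw [if_neg h2, if_pos (by push_cast at h1 h2 ⊢; omega)]
      have : v - (p : Int) - 1 = v - ((p : Int) + 1) := by ring
      push_cast
      rw [this]
  · rw [if_neg h1, Option.bind_none, if_neg (by push_cast at h1 ⊢; omega)]

lemma pvAlive_zero (fts : List Int) : pvAlive fts 0 = PySem.List.enumerate fts 0 := by
  unfold pvAlive
  have hf : pvAliveF 0 = fun iv => some iv := by
    funext iv
    obtain ⟨i, v⟩ := iv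
    simp only [pvAliveF]
    rw [if_pos (by push_cast; omega)]
    simp
  rw [hf]
  exact List.filterMap_some

lemma pvPassesTime_zero (fts : List Int) : pvPassesTime fts 0 = 0 := by
  unfold pvPassesTime
  induction fts with
  | nil => simp
  | cons x xs ih =>
      rw [List.map_cons, List.sum_cons, ih]
      split_ifs <;> omega

lemma pvLen_alive (fts : List Int) (p : Nat) :
    ((pvAlive fts p).length : Int) = pvPassesTime fts ((p : Int) + 1) - pvPassesTime fts p := by
  unfold pvAlive pvPassesTime
  have : ∀ (l : List Int) (s : Int),
      (((PySem.List.enumerate l s).filterMap (pvAliveF p)).length : Int) =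
        (l.map (fun v => if v ≤ 0 then (p : Int) + 1 else if v < (p : Int) + 1 then v else (p : Int) + 1)).sum
          - (l.map (fun v => if v ≤ 0 then (p : Int) else if v < (p : Int) then v else (p : Int))).sum := by
    intro l
    induction l with
    | nil => intro s; simp [PySem.List.enumerate_nil]
    | cons x xs ih =>
        intro s
        rw [PySem.List.enumerate_cons, List.filterMap_cons]
        simp only [pvAliveF] at ih ⊢
        by_cases hc : x ≤ 0 ∨ (p : Int) < x
        · rw [if_pos hc]
          simp only [List.length_cons, List.map_cons, List.sum_cons]
          push_cast
          rw [ih (s + 1)]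
          split_ifs <;> omega
        · rw [if_neg hc]
          simp only [List.map_cons, List.sum_cons]
          rw [ih (s + 1)]
          split_ifs <;> omega
  exact this fts 0

lemma pvT_closed (fts : List Int) (p : Nat) : pvT fts p = pvPassesTime fts (p : Int) := by
  induction p with
  | zero => simp [pvT, pvPassesTime_zero]
  | succ n ih =>
      show pvT fts n + ((pvAlive fts n).length : Int) = _
      rw [ih, pvLen_alive]
      push_cast
      ring

lemma pvRunA (fts : List Int) (k : Int) :
    ∀ (m q fuel : Nat), pvT fts (q + m) ≤ k → k < pvT fts (q + m + 1) → m < fuel →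
      pvLoopA fuel (pvAlive fts q) (pvT fts q) k =
        pvAns ((pvAlive fts (q + m)).getD (k - pvT fts (q + m)).toNat (0, 0)) := by
  intro m
  induction m with
  | zero =>
      intro q fuel h1 h2 hf
      obtain ⟨f, rfl⟩ : ∃ f, fuel = f + 1 := ⟨fuel - 1, by omega⟩
      simp only [Nat.add_zero] at h1 h2 ⊢
      rw [show pvLoopA (f + 1) (pvAlive fts q) (pvT fts q) k =
            match pvVisitA (pvAlive fts q) [] (pvT fts q) k with
            | Sum.inr ans => ans
            | Sum.inl (fts', time') => pvLoopA f fts' time' k from rfl]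
      rw [pvVisitA_hit k _ [] _ h1 (by
        have : pvT fts (q + 1) = pvT fts q + ((pvAlive fts q).length : Int) := rfl
        omega)]
  | succ m ih =>
      intro q fuel h1 h2 hf
      obtain ⟨f, rfl⟩ : ∃ f, fuel = f + 1 := ⟨fuel - 1, by omega⟩
      rw [show pvLoopA (f + 1) (pvAlive fts q) (pvT fts q) k =
            match pvVisitA (pvAlive fts q) [] (pvT fts q) k with
            | Sum.inr ans => ans
            | Sum.inl (fts', time') => pvLoopA f fts' time' k from rfl]
      have hskip : pvT fts q + ((pvAlive fts q).length : Int) ≤ k := by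
        have hT : pvT fts (q + 1) = pvT fts q + ((pvAlive fts q).length : Int) := rfl
        have hmono : pvT fts (q + 1) ≤ pvT fts (q + (m + 1)) := by
          clear hT h2 hf
          have : ∀ j : Nat, pvT fts (q + 1) ≤ pvT fts (q + 1 + j) := by
            intro j
            induction j with
            | zero => simp
            | succ n ihn =>
                have : pvT fts (q + 1 + (n + 1)) =
                    pvT fts (q + 1 + n) + ((pvAlive fts (q + 1 + n)).length : Int) := rfl
                omega
          have := this m
          rw [show q + 1 + m = q + (m + 1) by omega] at this
          exact this
        omega
      rw [pvVisitA_skip k _ [] _ hskip]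
      simp only [List.nil_append]
      rw [pvAlive_step]
      have hT : pvT fts q + ((pvAlive fts q).length : Int) = pvT fts (q + 1) := rfl
      rw [hT]
      have := ih (q + 1) f (by rw [show q + 1 + m = q + (m + 1) by omega]; exact h1)
        (by rw [show q + 1 + m = q + (m + 1) by omega]; exact h2) (by omega)
      rw [this, show q + 1 + m = q + (m + 1) by omega]

-- the per-pass visit count between two pass numbers with no finishable food finishing in between
lemma pvPT_gap (a b : Int) (hab : a ≤ b) (ha : 0 ≤ a) :
    ∀ (fts : List Int), (∀ w ∈ fts, 0 < w → a < w → b ≤ w) →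
      pvPassesTime fts b = pvPassesTime fts a + (b - a) * pvAC fts a := by
  intro fts
  induction fts with
  | nil => intro _; simp [pvPassesTime, pvAC]
  | cons x xs ih =>
      intro h
      have hx := h x (List.mem_cons_self ..)
      have hxs := ih (fun w hw => h w (List.mem_cons_of_mem _ hw))
      simp only [pvPassesTime, pvAC, List.map_cons, List.sum_cons, List.filter_cons] at hxs ⊢
      by_cases hc : x ≤ 0 ∨ a < x
      · have hbx : a < x → b ≤ x := fun h => hx (by omega) h
        have hterm : (if x ≤ 0 then b else if x < b then x else b)
            = (if x ≤ 0 then a else if x < a then x else a) + (b - a) := by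
          split_ifs <;> omega
        rw [hterm, hxs]
        simp only [decide_eq_true_eq]
        rw [if_pos hc]
        simp only [List.length_cons]
        push_cast
        ring
      · have hterm : (if x ≤ 0 then b else if x < b then x else b)
            = (if x ≤ 0 then a else if x < a then x else a) := by
          split_ifs <;> omega
        rw [hterm, hxs]
        simp only [decide_eq_true_eq]
        rw [if_neg hc]
        ring

-- with 0 ≤ q the alive count splits into never-finishing plus not-yet-eaten
lemma pvAC_split (q : Int) (hq : 0 ≤ q) :
    ∀ (fts : List Int), pvAC fts q = pvNP fts + ((fts.filter (fun w => decide (q < w))).length : Int) := by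
  intro fts
  induction fts with
  | nil => simp [pvAC, pvNP]
  | cons x xs ih =>
      simp only [pvAC, pvNP, List.filter_cons] at ih ⊢
      by_cases h1 : x ≤ 0
      · rw [if_pos (by simp only [decide_eq_true_eq]; omega), if_pos (by simpa using h1), if_neg (by simp only [decide_eq_true_eq]; omega)]
        simp only [List.length_cons]
        push_cast
        omega
      · by_cases h2 : q < x
        · rw [if_pos (by simp only [decide_eq_true_eq]; omega), if_neg (by simpa using h1), if_pos (by simpa using h2)]
          simp only [List.length_cons]
          push_cast
          omega
        · rw [if_neg (by simp only [decide_eq_true_eq]; omega), if_neg (by simpa using h1), if_neg (by simpa using h2)]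
          exact ih

-- one alive food forces pass q to begin no earlier than second q
lemma pvPT_ge_self (fts : List Int) (q : Int) (hq : 0 ≤ q) (hac : 1 ≤ pvAC fts q) :
    q ≤ pvPassesTime fts q := by
  have hne : fts.filter (fun w => decide (w ≤ 0 ∨ q < w)) ≠ [] := by
    intro h
    unfold pvAC at hac
    rw [h] at hac
    simp at hac
  obtain ⟨w, hw⟩ := List.exists_mem_of_ne_nil _ hne
  have hwm := List.mem_filter.mp hw
  have hwc : w ≤ 0 ∨ q < w := by simpa using hwm.2
  have hterm : q ∈ fts.map (fun v => if v ≤ 0 then q else if v < q then v else q) := by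
    apply List.mem_map.mpr
    exact ⟨w, hwm.1, by split_ifs <;> omega⟩
  have hnn : ∀ x ∈ fts.map (fun v => if v ≤ 0 then q else if v < q then v else q), 0 ≤ x := by
    intro x hx
    obtain ⟨v, _, rfl⟩ := List.mem_map.mp hx
    split_ifs <;> omega
  have := List.single_le_sum hnn _ hterm
  unfold pvPassesTime
  omega

-- Source B's layer loop: invariant-based characterisation of its final state
lemma pvLayersB_spec (fts : List Int) (k : Int) :
    ∀ (R : List Int) (time prev alive : Int),
      0 ≤ prev →
      time = pvPassesTime fts prev →
      time ≤ k →
      R.Pairwise (· ≤ ·) →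
      (∀ w ∈ R, prev ≤ w ∧ 0 < w) →
      alive = pvNP fts + (R.length : Int) →
      (fts.filter (fun w => decide (prev < w))).Perm (R.filter (fun w => decide (prev < w))) →
      0 ≤ (pvLayersB k R time prev alive).2.1 ∧
      (pvLayersB k R time prev alive).1 = pvPassesTime fts (pvLayersB k R time prev alive).2.1 ∧
      (pvLayersB k R time prev alive).1 ≤ k ∧
      (pvLayersB k R time prev alive).2.2 = pvAC fts (pvLayersB k R time prev alive).2.1 ∧
      ((∃ v ∈ fts, (pvLayersB k R time prev alive).2.1 < v ∧
          k < (pvLayersB k R time prev alive).1 + (v - (pvLayersB k R time prev alive).2.1) * (pvLayersB k R time prev alive).2.2 ∧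
          ∀ w ∈ fts, 0 < w → (pvLayersB k R time prev alive).2.1 < w → v ≤ w)
        ∨ (∀ w ∈ fts, 0 < w → w ≤ (pvLayersB k R time prev alive).2.1)) := by
  intro R
  induction R with
  | nil =>
      intro time prev alive h0 hPT hk _ _ hal hperm
      have hnopos : ∀ w ∈ fts, 0 < w → w ≤ prev := by
        intro w hw hwpos
        by_contra hgt
        have : w ∈ fts.filter (fun w => decide (prev < w)) :=
          List.mem_filter.mpr ⟨hw, by simp only [decide_eq_true_eq]; omega⟩
        rw [hperm.mem_iff] at this
        simp at this
      refine ⟨h0, hPT, hk, ?_, Or.inr hnopos⟩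
      show alive = pvAC fts prev
      rw [pvAC_split prev h0 fts, hal]
      have : fts.filter (fun w => decide (prev < w)) = [] := List.Perm.eq_nil (by simpa using hperm)
      rw [this]
  | cons v rest ih =>
      intro time prev alive h0 hPT hk hsort hmem hal hperm
      have hv := hmem v (List.mem_cons_self ..)
      have hrest : ∀ w ∈ rest, v ≤ w := (List.pairwise_cons.mp hsort).1
      by_cases hbr : time + (v - prev) * alive > k
      · -- break
        rw [show pvLayersB k (v :: rest) time prev alive =
              if time + (v - prev) * alive > k then (time, prev, alive)
              else pvLayersB k rest (time + (v - prev) * alive) v (alive - 1) from rfl,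
            if_pos hbr]
        have hal_nn : 0 ≤ pvNP fts := by unfold pvNP; positivity
        have halpos : 0 < alive := by
          rw [hal]; push_cast; simp only [List.length_cons]; push_cast; omega
        have hpv : prev < v := by
          rcases lt_or_ge prev v with h | h
          · exact h
          · have : v = prev := le_antisymm h hv.1
            subst this
            simp at hbr
            omega
        have hallgt : ∀ w ∈ v :: rest, prev < w := by
          intro w hw
          rcases List.mem_cons.mp hw with rfl | hw'
          · exact hpv
          · have := hrest w hw'; omega
        have hfilt : (v :: rest).filter (fun w => decide (prev < w)) = v :: rest := by
          apply List.filter_eq_self.mpr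
          intro w hw; simpa using hallgt w hw
        rw [hfilt] at hperm
        have hAC : alive = pvAC fts prev := by
          rw [pvAC_split prev h0 fts, hal, hperm.length_eq]
        have hvfts : v ∈ fts := by
          have : v ∈ fts.filter (fun w => decide (prev < w)) := by
            rw [hperm.mem_iff]; exact List.mem_cons_self ..
          exact (List.mem_filter.mp this).1
        refine ⟨h0, hPT, hk, hAC, Or.inl ⟨v, hvfts, hpv, by omega, ?_⟩⟩
        intro w hw hwpos hwgt
        have : w ∈ fts.filter (fun w => decide (prev < w)) :=
          List.mem_filter.mpr ⟨hw, by simp only [decide_eq_true_eq]; omega⟩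
        rw [hperm.mem_iff] at this
        rcases List.mem_cons.mp this with rfl | hw'
        · exact le_refl _
        · exact hrest w hw'
      · -- consume the layer
        rw [show pvLayersB k (v :: rest) time prev alive =
              if time + (v - prev) * alive > k then (time, prev, alive)
              else pvLayersB k rest (time + (v - prev) * alive) v (alive - 1) from rfl,
            if_neg hbr]
        -- new time equals pvPassesTime fts v
        have hperm' : (fts.filter (fun w => decide (v < w))).Perm (rest.filter (fun w => decide (v < w))) := by
          have h1 : fts.filter (fun w => decide (v < w)) =
              (fts.filter (fun w => decide (prev < w))).filter (fun w => decide (v < w)) := by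
            rw [List.filter_filter]
            apply List.filter_congr
            intro w _
            by_cases hvw : v < w
            · simp [hvw, show prev < w by have := hv.1; omega]
            · simp [hvw]
          rw [h1]
          have hpf := hperm.filter (fun w => decide (v < w))
          simp only [List.filter_filter] at hpf
          have h2 : (v :: rest).filter (fun a => decide (v < a) && decide (prev < a)) =
              rest.filter (fun w => decide (v < w)) := by
            rw [List.filter_cons, if_neg (by simp)]
            apply List.filter_congr
            intro w hw
            have hvw := hrest w hw
            by_cases hlt : v < w
            · simp [hlt, show prev < w by have := hv.1; omega]
            · simp [hlt]
          rw [h2] at hpf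
          rw [List.filter_filter]
          exact hpf
        have hPTv : time + (v - prev) * alive = pvPassesTime fts v := by
          by_cases hpv : prev < v
          · have hfilt : (v :: rest).filter (fun w => decide (prev < w)) = v :: rest := by
              apply List.filter_eq_self.mpr
              intro w hw
              rcases List.mem_cons.mp hw with rfl | hw'
              · simp; omega
              · have := hrest w hw'; simp; omega
            rw [hfilt] at hperm
            have hAC : alive = pvAC fts prev := by
              rw [pvAC_split prev h0 fts, hal, hperm.length_eq]
            have hgap := pvPT_gap prev v (by omega) h0 fts (by
              intro w hw hwpos hwgt
              have : w ∈ fts.filter (fun w => decide (prev < w)) :=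
                List.mem_filter.mpr ⟨hw, by simp only [decide_eq_true_eq]; omega⟩
              rw [hperm.mem_iff] at this
              rcases List.mem_cons.mp this with rfl | hw'
              · exact le_refl _
              · exact hrest w hw')
            rw [hgap, hPT, hAC]
          · have : v = prev := le_antisymm (by omega) hv.1
            subst this
            rw [hPT]
            ring
        exact ih (time + (v - prev) * alive) v (alive - 1) (by omega) hPTv (by omega)
          (List.pairwise_cons.mp hsort).2
          (fun w hw => ⟨hrest w hw, (hmem w (List.mem_cons_of_mem _ hw)).2⟩)
          (by rw [hal]; simp only [List.length_cons]; push_cast; ring)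
          hperm'

-- survivors listed with threshold prev name the alive foods of pass P when
-- no finishable food finishes strictly between prev and P
lemma pvSurv_eq (fts : List Int) (prev : Int) (P : Nat) (h1 : prev ≤ (P : Int))
    (h2 : ∀ w ∈ fts, 0 < w → prev < w → (P : Int) < w) :
    (PySem.List.enumerate fts 0).filterMap
        (fun iv => if prev < iv.2 ∨ iv.2 ≤ 0 then some iv.1 else none) =
      (pvAlive fts P).map Prod.fst := by
  unfold pvAlive
  rw [List.map_filterMap]
  apply List.filterMap_congr
  intro iv hiv
  obtain ⟨n, hn, rfl⟩ := (PySem.List.mem_enumerate_iff _ _ _).mp hiv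
  have hmem : fts[n] ∈ fts := List.getElem_mem _
  simp only [pvAliveF]
  by_cases hc : prev < fts[n] ∨ fts[n] ≤ 0
  · rw [if_pos hc, if_pos ?side]
    · rfl
    case side =>
      rcases hc with hc | hc
      · by_cases hp : fts[n] ≤ 0
        · exact Or.inl hp
        · exact Or.inr (h2 _ hmem (by omega) hc)
      · exact Or.inl hc
  · rw [if_neg hc, if_neg (by push_cast at hc ⊢; omega)]
    rfl

-- ===== VERDICT (by name: the statement is the Claim_ definition above) =====
theorem solution_spec : Claim_equal_solution := by
  intro fts k _ hpre
  unfold Spec_solution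
  obtain ⟨hk, hpre2⟩ := hpre
  -- run Source B's layer loop on the sorted finishable amounts
  set L := PySem.List.sorted (fts.filter (fun v => decide (0 < v))) (fun v => v) false with hL
  have hLsort : L.Pairwise (· ≤ ·) := by
    have := PySem.List.sorted_pairwise (xs := fts.filter (fun v => decide (0 < v))) (key := fun v => v)
    simpa [hL] using this
  have hLperm : L.Perm (fts.filter (fun v => decide (0 < v))) :=
    PySem.List.sorted_perm ..
  have hLmem : ∀ w ∈ L, (0 : Int) ≤ w ∧ 0 < w := by
    intro w hw
    rw [hLperm.mem_iff] at hw
    have := (List.mem_filter.mp hw).2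
    simp at this
    exact ⟨by omega, this⟩
  have hlen : (fts.length : Int) = pvNP fts + (L.length : Int) := by
    rw [hLperm.length_eq]
    exact pvNP_split fts
  have hfperm : (fts.filter (fun w => decide ((0:Int) < w))).Perm (L.filter (fun w => decide ((0:Int) < w))) := by
    have hLf : L.filter (fun w => decide ((0:Int) < w)) = L := by
      apply List.filter_eq_self.mpr
      intro w hw
      simpa using (hLmem w hw).2
    rw [hLf]
    exact hLperm.symm
  have hspec := pvLayersB_spec fts k L 0 0 (fts.length : Int) (le_refl _)
    (by rw [pvPassesTime_zero]) hk hLsort hLmem hlen hfperm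
  set s := pvLayersB k L 0 0 (fts.length : Int) with hs
  obtain ⟨hprev0, hPT, htk, hAC, hbound⟩ := hspec
  set time := s.1
  set prev := s.2.1
  set alive := s.2.2
  -- the alive count is positive
  have halivepos : 0 < alive := by
    rcases hbound with ⟨v, hvfts, hpv, _, _⟩ | hnopos
    · rw [hAC]
      unfold pvAC
      have : v ∈ fts.filter (fun w => decide (w ≤ 0 ∨ prev < w)) :=
        List.mem_filter.mpr ⟨hvfts, by simp only [decide_eq_true_eq]; omega⟩
      have := List.length_pos_of_mem this
      push_cast
      omega
    · rcases hpre2 with ⟨v0, hv0m, hv0⟩ | hsum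
      · rw [hAC]
        unfold pvAC
        have : v0 ∈ fts.filter (fun w => decide (w ≤ 0 ∨ prev < w)) :=
          List.mem_filter.mpr ⟨hv0m, by simp only [decide_eq_true_eq]; omega⟩
        have := List.length_pos_of_mem this
        push_cast
        omega
      · -- no food ever finishes after prev and none is never-finishing: contradiction with k < total
        exfalso
        have hPTfull : (fts.map (fun v => max v 0)).sum ≤ pvPassesTime fts prev := by
          unfold pvPassesTime
          apply List.sum_le_sum
          intro w hw
          by_cases hwp : 0 < w
          · have := hnopos w hw hwp
            split_ifs <;> omega
          · split_ifs <;> omega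
        omega
  -- the landing pass p and its Nat form P
  set off := k - time with hoff
  have hoff0 : 0 ≤ off := by omega
  set p := prev + off / alive with hp
  have hdiv0 : 0 ≤ off / alive := Int.ediv_nonneg hoff0 (by omega)
  have hprevp : prev ≤ p := by omega
  have hmod0 : 0 ≤ off % alive := Int.emod_nonneg off (by omega)
  have hmodlt : off % alive < alive := Int.emod_lt_of_pos off halivepos
  have hmoddef : off % alive = off - alive * (off / alive) := Int.emod_def off alive
  -- no finishable food finishes in (prev, p]
  have hnofin : ∀ w ∈ fts, 0 < w → prev < w → p < w := by
    intro w hw hwpos hwgt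
    rcases hbound with ⟨v, _, hpv, hbrk, hmin⟩ | hnopos
    · have hvw := hmin w hw hwpos hwgt
      have hdivlt : off / alive < v - prev := by
        apply Int.ediv_lt_of_lt_mul halivepos
        nlinarith
      omega
    · exact absurd (hnopos w hw hwpos) (by omega)
  have hnofin1 : ∀ w ∈ fts, 0 < w → prev < w → p + 1 ≤ w := by
    intro w hw h1 h2
    have := hnofin w hw h1 h2
    omega
  -- pass times around p
  have hPTp : pvPassesTime fts p = time + (p - prev) * alive := by
    rw [pvPT_gap prev p hprevp hprev0 fts (fun w hw h1 h2 => le_of_lt (hnofin w hw h1 h2)),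
        ← hPT, ← hAC]
  have hPTp1 : pvPassesTime fts (p + 1) = time + (p + 1 - prev) * alive := by
    rw [pvPT_gap prev (p + 1) (by omega) hprev0 fts hnofin1, ← hPT, ← hAC]
  set P := p.toNat with hPdef
  have hPcast : (P : Int) = p := Int.toNat_of_nonneg (by omega)
  have hTp : pvT fts P ≤ k := by
    rw [pvT_closed, hPcast, hPTp]
    nlinarith [hmoddef, hmod0]
  have hTp1 : k < pvT fts (P + 1) := by
    rw [pvT_closed]
    push_cast
    rw [hPcast, hPTp1]
    nlinarith [hmoddef, hmodlt]
  -- fuel bound: P ≤ k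
  have hPle : (P : Int) ≤ k := by
    have hge := pvPT_ge_self fts prev hprev0 (by omega)
    have : p ≤ pvPassesTime fts p := by
      rw [hPTp]
      nlinarith
    rw [pvT_closed, hPcast] at hTp
    omega
  -- A's value
  have hA : solution fts k = pvAns ((pvAlive fts P).getD (k - pvT fts P).toNat (0, 0)) := by
    unfold solution
    have := pvRunA fts k P 0 (k.toNat + 1)
      (by simpa using hTp) (by simpa using hTp1) (by omega)
    simpa [pvAlive_zero, pvT] using this
  -- index bound
  have hlenT : pvT fts (P + 1) = pvT fts P + ((pvAlive fts P).length : Int) := rfl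
  have hoffk0 : 0 ≤ k - pvT fts P := by omega
  have hoffl : (k - pvT fts P).toNat < (pvAlive fts P).length := by
    have h1 : k < pvT fts P + ((pvAlive fts P).length : Int) := by
      rw [← hlenT]
      exact hTp1
    omega
  -- the offset Source B computes
  have hoffeq : PySem.Int.mod (k - time) alive = k - pvT fts P := by
    rw [PySem.Int.mod_eq_emod_of_pos halivepos, pvT_closed, hPcast, hPTp, ← hoff]
    have h2 : (p - prev) * alive = alive * (off / alive) := by
      rw [hp]
      ring
    omega
  -- unfold B (zeta-expanding its lets)
  show solution fts k =
    (match PySem.List.pyGet?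
        ((PySem.List.enumerate fts 0).filterMap
          (fun iv => if s.2.1 < iv.2 ∨ iv.2 ≤ 0 then some iv.1 else none))
        (PySem.Int.mod (k - s.1) s.2.2) with
     | some i => if 0 < PySem.List.pyGetD fts i 0 then i + 1 else -1
     | none => -1)
  rw [hoffeq, pvSurv_eq fts prev P (by omega) (by
    intro w hw h1 h2
    have := hnofin w hw h1 h2
    omega)]
  rw [PySem.List.pyGet?_of_nonneg _ hoffk0]
  rw [List.getElem?_eq_getElem (by simpa using hoffl)]
  simp only [List.getElem_map]
  -- the element at the landing position
  have hmem : (pvAlive fts P)[(k - pvT fts P).toNat]'hoffl ∈ pvAlive fts P := List.getElem_mem _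
  obtain ⟨iv, hivmem, hiv⟩ := List.mem_filterMap.mp hmem
  obtain ⟨n, hn, rfl⟩ := (PySem.List.mem_enumerate_iff _ _ _).mp hivmem
  simp only [pvAliveF] at hiv
  by_cases hc : fts[n] ≤ 0 ∨ (P : Int) < fts[n]
  swap
  · rw [if_neg hc] at hiv; exact absurd hiv (by simp)
  rw [if_pos hc] at hiv
  have hel : (pvAlive fts P)[(k - pvT fts P).toNat]'hoffl = ((0 : Int) + n, fts[n] - P) :=
    (Option.some.injEq _ _).mp hiv.symm
  rw [hA, List.getD_eq_getElem _ _ hoffl, hel]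
  simp only [pvAns, zero_add]
  have hget : PySem.List.pyGetD fts ((n : Nat) : Int) 0 = fts[n] := by
    rw [PySem.List.pyGetD_natCast]
    exact List.getD_eq_getElem _ _ hn
  rw [hget]
  rcases hc with hc | hc
  · rw [if_pos (by omega : fts[n] - (P : Int) ≤ 0), if_neg (by omega : ¬ (0 : Int) < fts[n])]
  · rw [if_neg (by omega : ¬ fts[n] - (P : Int) ≤ 0), if_pos (by omega : (0 : Int) < fts[n])]
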